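-- pv_equiv track=rewrite | github.com/karthiknrao/scarface | evolve/make_layer.py | get_output_nodes
-- ===== SOURCE A (Python) =====
-- num_nodes = 5
--
-- def get_output_nodes(blist):
--     node_outs = []
--     for i in range(len(blist)):
--         out = 0
--         for node in blist[i:]:
--             out += node[i]
--         node_outs.append(out)
--     return ( [ k for k, val in enumerate(node_outs) if val > 0 ], \
--                  [ k for k, val in enumerate(node_outs) if val == 0 ] + [ num_nodes - 1 ] )
-- ===== SOURCE B (Python) =====
-- num_nodes = 5
--
-- def get_output_nodes(blist):
--     def col_sums(rows):
--         # column sums where column index advances with the row index: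
--         # head = sum of the first element of every row; recurse on the
--         # remaining rows with their first element peeled off.
--         if not rows:
--             return []
--         first = 0
--         for row in rows:
--             first += row[0]
--         return [first] + col_sums([row[1:] for row in rows[1:]])
--     pos, zero = [], []
--     for k, val in enumerate(col_sums(blist)):
--         if val > 0:
--             pos.append(k)
--         elif val == 0:
--             zero.append(k)
--     return (pos, zero + [num_nodes - 1])
-- ===== Notes on version B (the rewrite author's own statement) =====
-- stated objective: alternative
-- what changed: Replaces A's index loop (one running column sum per range index, via slices blist[i:] and node[i]) by a structural recursion that peels the first element of every row (head = sum of row[0], recurse on the tails), and merges A's two enumerate comprehensions into one classification pass with a pair accumulator.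
import Mathlib
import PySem

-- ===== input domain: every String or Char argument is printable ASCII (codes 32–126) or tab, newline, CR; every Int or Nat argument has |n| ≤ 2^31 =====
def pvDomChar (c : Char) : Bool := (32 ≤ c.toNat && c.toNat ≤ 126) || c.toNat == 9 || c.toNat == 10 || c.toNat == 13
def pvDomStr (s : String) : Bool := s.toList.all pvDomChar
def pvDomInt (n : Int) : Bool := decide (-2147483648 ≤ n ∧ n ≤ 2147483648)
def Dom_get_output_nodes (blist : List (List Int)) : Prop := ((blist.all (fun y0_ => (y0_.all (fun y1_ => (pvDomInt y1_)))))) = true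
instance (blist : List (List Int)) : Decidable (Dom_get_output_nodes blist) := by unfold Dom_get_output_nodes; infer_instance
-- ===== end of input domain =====

-- B replaces A's index-loop column summation (slices blist[i:], running sum per range index,
-- two enumerate comprehensions) by a structural recursion peeling the first element of every
-- row, plus a single classification pass; objective: alternative decomposition, same cost.


def pv_num_nodes : Int := 5

-- ===== PORT A =====
-- node[i] is ported with pyGetD (default 0); Pre_ below excludes exactly the inputs where
-- Python's node[i] raises IndexError.
def get_output_nodes (blist : List (List Int)) : List Int × List Int :=
  let node_outs : List Int :=
    (PySem.List.pyRange 0 (blist.length : Int) 1).foldl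
      (fun acc i =>
        acc ++ [ (PySem.List.slice blist (some i) none).foldl
                   (fun out node => out + PySem.List.pyGetD node i 0) 0 ]) []
  ( (PySem.List.enumerate node_outs 0).foldl
      (fun acc kv => if 0 < kv.2 then acc ++ [kv.1] else acc) [],
    (PySem.List.enumerate node_outs 0).foldl
      (fun acc kv => if kv.2 = 0 then acc ++ [kv.1] else acc) [] ++ [pv_num_nodes - 1] )

-- ===== PORT B =====
-- row[0] is ported with pyGetD (default 0); same IndexError inputs are excluded by Pre_.
def pv_colSums : List (List Int) → List Int
  | [] => []
  | r :: rest =>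
      ((r :: rest).foldl (fun acc row => acc + PySem.List.pyGetD row 0 0) 0)
        :: pv_colSums (rest.map (fun row => PySem.List.slice row (some 1) none))
termination_by rows => rows.length
decreasing_by simp

def get_output_nodes_alt (blist : List (List Int)) : List Int × List Int :=
  let pz :=
    (PySem.List.enumerate (pv_colSums blist) 0).foldl
      (fun (acc : List Int × List Int) kv =>
        if 0 < kv.2 then (acc.1 ++ [kv.1], acc.2)
        else if kv.2 = 0 then (acc.1, acc.2 ++ [kv.1]) else acc) ([], [])
  (pz.1, pz.2 ++ [pv_num_nodes - 1])

-- ===== PRECONDITION & SPEC =====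
-- Pre_ excludes exactly the ragged inputs where Python A raises IndexError (some row j
-- shorter than j+1, so node[i] with i ≤ j is out of range); Python B raises there too.
def Pre_get_output_nodes (blist : List (List Int)) : Prop :=
  ∀ i ∈ List.range blist.length, i < (blist.getD i []).length
instance (blist : List (List Int)) : Decidable (Pre_get_output_nodes blist) := by
  unfold Pre_get_output_nodes; infer_instance

def pvWitness_get_output_nodes : List (List Int) := [[1], [0, 2], [-1, 0, 0]]

def Spec_get_output_nodes (blist : List (List Int)) (out : List Int × List Int) : Prop := out = get_output_nodes_alt blist
instance (blist : List (List Int)) (out : List Int × List Int) : Decidable (Spec_get_output_nodes blist out) := by unfold Spec_get_output_nodes; infer_instance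

-- ===== CLAIM (what is proved, stated in full; the proofs are below) =====
def Claim_equal_get_output_nodes : Prop := ∀ (blist : List (List Int)), Dom_get_output_nodes blist → Pre_get_output_nodes blist → Spec_get_output_nodes blist (get_output_nodes blist)

-- ===== LEMMAS AND PROOFS =====

-- A's per-column sum (the inner loop of A's port, named for the proofs).
def pv_aSum (blist : List (List Int)) (i : Int) : Int :=
  (PySem.List.slice blist (some i) none).foldl
    (fun out node => out + PySem.List.pyGetD node i 0) 0

lemma pv_getD_tail (node : List Int) (k : Nat) :
    node.tail.getD k 0 = node.getD (k + 1) 0 := by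
  cases node <;> simp [List.getD]

lemma pv_aSum_succ (r : List Int) (rest : List (List Int)) (k : Nat) :
    pv_aSum (r :: rest) ((k : Int) + 1)
      = pv_aSum (rest.map (fun row => PySem.List.slice row (some 1) none)) (k : Int) := by
  unfold pv_aSum
  have hc : ((k : Int) + 1) = ((k + 1 : Nat) : Int) := by push_cast; ring
  rw [hc, PySem.List.slice_from_natCast, PySem.List.slice_from_natCast,
    ← List.map_drop, List.foldl_map]
  simp only [List.drop_succ_cons]
  congr 1
  funext out node
  rw [PySem.List.slice_from_one, PySem.List.pyGetD_natCast, PySem.List.pyGetD_natCast,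
    pv_getD_tail]

lemma pv_map_aSum_eq_colSums : ∀ (blist : List (List Int)),
    (List.range blist.length).map (fun (k : Nat) => pv_aSum blist (k : Int)) = pv_colSums blist
  | [] => by simp [pv_colSums]
  | r :: rest => by
    have ih := pv_map_aSum_eq_colSums (rest.map (fun row => PySem.List.slice row (some 1) none))
    simp only [List.length_map] at ih
    rw [pv_colSums]
    have hlen : List.range (r :: rest).length = 0 :: (List.range rest.length).map Nat.succ := by
      simp [List.range_succ_eq_map]
    rw [hlen, List.map_cons, List.map_map]
    congr 1
    · unfold pv_aSum
      rw [show ((0 : Nat) : Int) = (0 : Int) from rfl, PySem.List.slice_zero_start,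
        PySem.List.slice_none_none]
    · rw [← ih]
      apply List.map_congr_left
      intro k _
      have hk : ((Nat.succ k : Nat) : Int) = (k : Int) + 1 := by push_cast; ring
      simp only [Function.comp_apply, hk, pv_aSum_succ]
termination_by blist => blist.length
decreasing_by simp

lemma pv_classify_split (l : List (Int × Int)) (a b : List Int) :
    l.foldl (fun (acc : List Int × List Int) kv =>
        if 0 < kv.2 then (acc.1 ++ [kv.1], acc.2)
        else if kv.2 = 0 then (acc.1, acc.2 ++ [kv.1]) else acc) (a, b)
    = (l.foldl (fun acc kv => if 0 < kv.2 then acc ++ [kv.1] else acc) a,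
       l.foldl (fun acc kv => if kv.2 = 0 then acc ++ [kv.1] else acc) b) := by
  induction l generalizing a b with
  | nil => rfl
  | cons x l ih =>
    simp only [List.foldl_cons]
    by_cases h1 : 0 < x.2
    · have h2 : ¬ x.2 = 0 := by omega
      simp only [if_pos h1, if_neg h2]; exact ih _ _
    · by_cases h2 : x.2 = 0
      · simp only [if_neg h1, if_pos h2]; exact ih _ _
      · simp only [if_neg h1, if_neg h2]; exact ih _ _

lemma pv_node_outs_eq (blist : List (List Int)) :
    (PySem.List.pyRange 0 (blist.length : Int) 1).foldl
      (fun acc i =>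
        acc ++ [ (PySem.List.slice blist (some i) none).foldl
                   (fun out node => out + PySem.List.pyGetD node i 0) 0 ]) []
    = pv_colSums blist := by
  have h : ∀ i, (PySem.List.slice blist (some i) none).foldl
      (fun out node => out + PySem.List.pyGetD node i 0) 0 = pv_aSum blist i := fun _ => rfl
  calc (PySem.List.pyRange 0 (blist.length : Int) 1).foldl
        (fun acc i =>
          acc ++ [ (PySem.List.slice blist (some i) none).foldl
                    (fun out node => out + PySem.List.pyGetD node i 0) 0 ]) []
      = (PySem.List.pyRange 0 (blist.length : Int) 1).map (fun i => pv_aSum blist i) := by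
        simp only [h]
        exact PySem.List.foldl_append_singleton_eq_map _ _ []
    _ = (List.range blist.length).map (fun (k : Nat) => pv_aSum blist (k : Int)) := by
        rw [PySem.List.pyRange_one, List.map_map]
        simp
    _ = pv_colSums blist := pv_map_aSum_eq_colSums blist

-- ===== VERDICT (by name: the statement is the Claim_ definition above) =====
theorem get_output_nodes_spec : Claim_equal_get_output_nodes := by
  intro blist _ _
  unfold Spec_get_output_nodes get_output_nodes get_output_nodes_alt
  rw [pv_node_outs_eq, pv_classify_split]
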